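-- pv_equiv track=rewrite | github.com/meghakalia/zepp_muscular_exertion | minute_exertion_per_minute_data.py | _group_hr_by_minute
-- ===== SOURCE A (Python) =====
-- def _group_hr_by_minute(hr_ts, hr_vals, workout_start_ms):
--     """Return dict: minute_index -> (hr_list, ts_list)."""
--     groups = {}
--     for ts, hr in zip(hr_ts, hr_vals):
--         if hr <= 0:
--             continue
--         minute = int((ts - workout_start_ms) // 60000)
--         groups.setdefault(minute, ([], []))
--         groups[minute][0].append(hr)
--         groups[minute][1].append(ts)
--     return groups
-- ===== SOURCE B (Python) =====
-- def _group_hr_by_minute(hr_ts, hr_vals, workout_start_ms):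
--     """Return dict: minute_index -> (hr_list, ts_list)."""
--     triples = [((ts - workout_start_ms) // 60000, hr, ts)
--                for ts, hr in zip(hr_ts, hr_vals) if hr > 0]
--     keys = list(dict.fromkeys(m for m, _, _ in triples))
--     return {k: ([h for m, h, _ in triples if m == k],
--                 [t for m, _, t in triples if m == k])
--             for k in keys}
-- ===== Notes on version B (the rewrite author's own statement) =====
-- stated objective: alternative
-- what changed: Replaces A's incremental dict-of-buckets loop (setdefault + in-place appends) by a declarative pipeline: one filter-map pass building (minute, hr, ts) triples, an ordered dedup of the minute keys, then per-key comprehensions assembling each group.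
import Mathlib
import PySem

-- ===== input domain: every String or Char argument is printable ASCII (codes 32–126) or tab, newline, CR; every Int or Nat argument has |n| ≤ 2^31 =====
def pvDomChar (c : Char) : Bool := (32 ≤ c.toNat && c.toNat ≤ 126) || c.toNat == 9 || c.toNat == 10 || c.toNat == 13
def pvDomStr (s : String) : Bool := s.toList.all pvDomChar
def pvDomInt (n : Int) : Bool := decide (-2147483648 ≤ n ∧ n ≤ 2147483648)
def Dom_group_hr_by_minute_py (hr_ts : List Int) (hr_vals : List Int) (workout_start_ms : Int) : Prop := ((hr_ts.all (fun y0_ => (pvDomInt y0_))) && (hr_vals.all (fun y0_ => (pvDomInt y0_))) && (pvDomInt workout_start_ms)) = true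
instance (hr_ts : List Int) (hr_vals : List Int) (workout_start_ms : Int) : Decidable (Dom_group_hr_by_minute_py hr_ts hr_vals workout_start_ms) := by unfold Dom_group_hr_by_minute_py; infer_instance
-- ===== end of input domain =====

-- B replaces A's incremental dict-bucket loop by a filter-map pass building (minute, hr, ts)
-- triples, an ordered key dedup, and per-key comprehensions (objective: alternative, same result).

-- ===== PORT A =====
def group_hr_by_minute_py (hr_ts : List Int) (hr_vals : List Int) (workout_start_ms : Int) : List (Int × List Int × List Int) :=
  let groups : PySem.Dict Int (List Int × List Int) :=
    (hr_ts.zip hr_vals).foldl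
      (fun groups p =>
        if p.2 ≤ 0 then groups
        else
          let minute := PySem.Int.floordiv (p.1 - workout_start_ms) 60000
          let groups := groups.setdefault minute ([], [])
          let groups := groups.modify minute ([], []) (fun q => (q.1 ++ [p.2], q.2))
          let groups := groups.modify minute ([], []) (fun q => (q.1, q.2 ++ [p.1]))
          groups)
      PySem.Dict.empty
  groups.items

-- ===== PORT B =====
def group_hr_by_minute_py_alt (hr_ts : List Int) (hr_vals : List Int) (workout_start_ms : Int) : List (Int × List Int × List Int) :=
  let triples := ((hr_ts.zip hr_vals).filter (fun p => decide (0 < p.2))).map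
      (fun p => (PySem.Int.floordiv (p.1 - workout_start_ms) 60000, p.2, p.1))
  let keys := PySem.List.dedup (triples.map (fun t => t.1))
  keys.map (fun k =>
    (k, ((triples.filter (fun t => t.1 == k)).map (fun t => t.2.1),
         (triples.filter (fun t => t.1 == k)).map (fun t => t.2.2))))

-- ===== PRECONDITION & SPEC =====
def Spec_group_hr_by_minute_py (hr_ts : List Int) (hr_vals : List Int) (workout_start_ms : Int) (out : List (Int × List Int × List Int)) : Prop := out = group_hr_by_minute_py_alt hr_ts hr_vals workout_start_ms
instance (hr_ts : List Int) (hr_vals : List Int) (workout_start_ms : Int) (out : List (Int × List Int × List Int)) : Decidable (Spec_group_hr_by_minute_py hr_ts hr_vals workout_start_ms out) := by unfold Spec_group_hr_by_minute_py; infer_instance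

-- ===== CLAIM (what is proved, stated in full; the proofs are below) =====
def Claim_equal_group_hr_by_minute_py : Prop := ∀ (hr_ts : List Int) (hr_vals : List Int) (workout_start_ms : Int), Dom_group_hr_by_minute_py hr_ts hr_vals workout_start_ms → Spec_group_hr_by_minute_py hr_ts hr_vals workout_start_ms (group_hr_by_minute_py hr_ts hr_vals workout_start_ms)

-- ===== LEMMAS AND PROOFS =====

-- A's loop body, rephrased on the (minute, hr, ts) triple it processes.
def pvStep (g : PySem.Dict Int (List Int × List Int)) (t : Int × Int × Int) : PySem.Dict Int (List Int × List Int) :=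
  ((g.setdefault t.1 ([], [])).modify t.1 ([], []) (fun q => (q.1 ++ [t.2.1], q.2))).modify t.1 ([], []) (fun q => (q.1, q.2 ++ [t.2.2]))

-- A's fold over the raw (ts, hr) pairs is the fold of pvStep over the surviving triples.
theorem pvFold_eq_triples (w : Int) (l : List (Int × Int)) (g : PySem.Dict Int (List Int × List Int)) :
    l.foldl
      (fun groups p =>
        if p.2 ≤ 0 then groups
        else
          let minute := PySem.Int.floordiv (p.1 - w) 60000
          let groups := groups.setdefault minute ([], [])
          let groups := groups.modify minute ([], []) (fun q => (q.1 ++ [p.2], q.2))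
          let groups := groups.modify minute ([], []) (fun q => (q.1, q.2 ++ [p.1]))
          groups) g
    = ((l.filter (fun p => decide (0 < p.2))).map
        (fun p => (PySem.Int.floordiv (p.1 - w) 60000, p.2, p.1))).foldl pvStep g := by
  induction l generalizing g with
  | nil => rfl
  | cons p l ih =>
    simp only [List.foldl_cons, List.filter_cons]
    by_cases h : p.2 ≤ 0
    · rw [if_pos h, decide_eq_false (by omega : ¬ 0 < p.2)]
      simp only [Bool.false_eq_true, if_false]
      exact ih g
    · rw [if_neg h, decide_eq_true (by omega : 0 < p.2)]
      simp only [if_true, List.map_cons, List.foldl_cons]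
      exact ih _

theorem pvKeys_modify_of_contains (d : PySem.Dict Int (List Int × List Int)) (k : Int)
    (d0 : List Int × List Int) (f : List Int × List Int → List Int × List Int)
    (h : d.contains k = true) : (d.modify k d0 f).keys = d.keys := by
  rw [PySem.Dict.keys_modify, PySem.Dict.keys_insert_of_contains _ _ h]

theorem pvStep_keys (g : PySem.Dict Int (List Int × List Int)) (t : Int × Int × Int) :
    (pvStep g t).keys = PySem.Set.add g.keys t.1 := by
  unfold pvStep
  cases h : g.contains t.1 with
  | true =>
    have hm : t.1 ∈ g.keys := by
      rw [PySem.Dict.contains_eq_decide_mem_keys] at h; simpa using h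
    rw [PySem.Dict.setdefault_of_contains _ _ h,
        pvKeys_modify_of_contains _ _ _ _ (by simp [PySem.Dict.contains_modify]),
        pvKeys_modify_of_contains _ _ _ _ h]
    simp [PySem.Set.add, PySem.Set.contains, hm]
  | false =>
    have hm : t.1 ∉ g.keys := by
      rw [PySem.Dict.contains_eq_decide_mem_keys] at h; simpa using h
    rw [PySem.Dict.setdefault_of_not_contains _ _ h,
        pvKeys_modify_of_contains _ _ _ _ (by simp [PySem.Dict.contains_modify]),
        pvKeys_modify_of_contains _ _ _ _ (by simp),
        PySem.Dict.keys_insert_of_not_contains _ _ h]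
    simp [PySem.Set.add, PySem.Set.contains, hm]

theorem pvStep_getD (g : PySem.Dict Int (List Int × List Int)) (t : Int × Int × Int) (c : Int) :
    (pvStep g t).getD c ([], []) =
      if c = t.1 then ((g.getD t.1 ([], [])).1 ++ [t.2.1], (g.getD t.1 ([], [])).2 ++ [t.2.2])
      else g.getD c ([], []) := by
  unfold pvStep
  cases h : g.contains t.1 with
  | true =>
    rw [PySem.Dict.setdefault_of_contains _ _ h,
        PySem.Dict.getD_modify, PySem.Dict.getD_modify, PySem.Dict.getD_modify]
    by_cases hc : c = t.1 <;> simp [hc]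
  | false =>
    rw [PySem.Dict.setdefault_of_not_contains _ _ h,
        PySem.Dict.getD_modify, PySem.Dict.getD_modify, PySem.Dict.getD_modify,
        PySem.Dict.getD_insert, PySem.Dict.getD_insert,
        PySem.Dict.getD_of_not_contains _ _ h]
    by_cases hc : c = t.1 <;> simp [hc]

theorem pvFold_keys (L : List (Int × Int × Int)) :
    (L.foldl pvStep PySem.Dict.empty).keys = PySem.Set.ofList (L.map (fun t => t.1)) := by
  induction L using List.reverseRecOn with
  | nil => simp [PySem.Set.ofList, PySem.Set.empty, PySem.Dict.keys_empty]
  | append_singleton L t ih =>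
    rw [List.foldl_append, List.foldl_cons, List.foldl_nil, pvStep_keys, ih]
    simp [PySem.Set.ofList]

theorem pvFold_getD (L : List (Int × Int × Int)) (c : Int) :
    (L.foldl pvStep PySem.Dict.empty).getD c ([], []) =
      ((L.filter (fun t => t.1 == c)).map (fun t => t.2.1),
       (L.filter (fun t => t.1 == c)).map (fun t => t.2.2)) := by
  induction L using List.reverseRecOn with
  | nil => simp [PySem.Dict.getD_empty]
  | append_singleton L t ih =>
    rw [List.foldl_append, List.foldl_cons, List.foldl_nil, pvStep_getD]
    by_cases hc : c = t.1
    · subst hc; simp [ih]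
    · simp [ih, hc, Ne.symm hc]

theorem pvFold_items (L : List (Int × Int × Int)) :
    (L.foldl pvStep PySem.Dict.empty).items =
      (PySem.Set.ofList (L.map (fun t => t.1))).map (fun k =>
        (k, ((L.filter (fun t => t.1 == k)).map (fun t => t.2.1),
             (L.filter (fun t => t.1 == k)).map (fun t => t.2.2)))) := by
  rw [PySem.Dict.items_eq_map_keys _ (by rw [pvFold_keys]; exact PySem.Set.nodup_ofList _) ([], [])]
  rw [pvFold_keys]
  exact List.map_congr_left (fun k _ => by rw [pvFold_getD])

-- ===== VERDICT (by name: the statement is the Claim_ definition above) =====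
theorem group_hr_by_minute_py_spec : Claim_equal_group_hr_by_minute_py := by
  intro hr_ts hr_vals w _
  unfold Spec_group_hr_by_minute_py group_hr_by_minute_py group_hr_by_minute_py_alt
  rw [pvFold_eq_triples, pvFold_items]
  simp only [PySem.List.dedup_eq_ofList]
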